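-- pv_equiv track=rewrite | github.com/rw1445/Cylindabot-sim | designing_terrain.py | double_slope
-- ===== SOURCE A (Python) =====
-- def double_slope(slope1,slope2):
--     grid_size=11
--     height = 0
--     heights = []
--     for i in range(grid_size):
--         heights += [height]
--         if i%2 == 0:
--             height += slope1
--         else:
--             height += slope2
--     total = height - slope1
--
--     return heights, grid_size, total
-- ===== SOURCE B (Python) =====
-- def double_slope(slope1, slope2):
--     # Closed form: heights[i] = ceil(i/2)*slope1 + floor(i/2)*slope2
--     heights = [0] + [((i + 1) // 2) * slope1 + (i // 2) * slope2 for i in range(1, 11)]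
--     return heights, 11, 5 * slope1 + 5 * slope2
-- ===== Notes on version B (the rewrite author's own statement) =====
-- stated objective: simpler
-- what changed: Replaced the accumulating loop with branching on parity by a closed-form comprehension (heights[i] = ceil(i/2)*slope1 + floor(i/2)*slope2) and a literal total 5*slope1 + 5*slope2.
import Mathlib
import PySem

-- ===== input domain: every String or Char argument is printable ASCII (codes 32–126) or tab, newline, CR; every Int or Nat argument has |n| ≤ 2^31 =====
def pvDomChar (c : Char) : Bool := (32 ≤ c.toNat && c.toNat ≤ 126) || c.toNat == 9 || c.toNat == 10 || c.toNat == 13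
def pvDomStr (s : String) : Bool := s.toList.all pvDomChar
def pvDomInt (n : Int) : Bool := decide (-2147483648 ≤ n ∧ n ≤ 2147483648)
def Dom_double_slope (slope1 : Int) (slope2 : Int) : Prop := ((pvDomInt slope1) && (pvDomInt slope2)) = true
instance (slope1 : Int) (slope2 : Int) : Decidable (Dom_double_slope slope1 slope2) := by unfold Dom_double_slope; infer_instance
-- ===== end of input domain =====

-- B replaces A's parity-branching accumulation loop by a closed-form formula per cell (simpler).

-- ===== PORT A =====
def double_slope (slope1 : Int) (slope2 : Int) : List Int × Int × Int :=
  let grid_size : Int := 11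
  let init : Int × List Int := (0, [])
  let res := (PySem.List.pyRange 0 grid_size 1).foldl
    (fun (st : Int × List Int) (i : Int) =>
      let heights := st.2 ++ [st.1]
      let height := if PySem.Int.mod i 2 = 0 then st.1 + slope1 else st.1 + slope2
      (height, heights)) init
  let total := res.1 - slope1
  (res.2, grid_size, total)

-- ===== PORT B =====
def double_slope_alt (slope1 : Int) (slope2 : Int) : List Int × Int × Int :=
  let heights := [(0 : Int)] ++ (PySem.List.pyRange 1 11 1).map
    (fun i => PySem.Int.floordiv (i + 1) 2 * slope1 + PySem.Int.floordiv i 2 * slope2)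
  (heights, 11, 5 * slope1 + 5 * slope2)

-- ===== PRECONDITION & SPEC =====
def Spec_double_slope (slope1 : Int) (slope2 : Int) (out : List Int × Int × Int) : Prop := out = double_slope_alt slope1 slope2
instance (slope1 : Int) (slope2 : Int) (out : List Int × Int × Int) : Decidable (Spec_double_slope slope1 slope2 out) := by unfold Spec_double_slope; infer_instance

-- ===== CLAIM (what is proved, stated in full; the proofs are below) =====
def Claim_equal_double_slope : Prop := ∀ (slope1 : Int) (slope2 : Int), Dom_double_slope slope1 slope2 → Spec_double_slope slope1 slope2 (double_slope slope1 slope2)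

-- ===== LEMMAS AND PROOFS =====

-- ===== VERDICT (by name: the statement is the Claim_ definition above) =====
theorem double_slope_spec : Claim_equal_double_slope := by
  intro s1 s2 _
  unfold Spec_double_slope double_slope double_slope_alt
  norm_num [PySem.List.pyRange, PySem.Int.mod, PySem.Int.floordiv,
    show Int.toNat 11 = 11 from rfl, show Int.toNat 10 = 10 from rfl, List.range_succ]
  norm_num [Int.fmod, Int.fdiv]
  refine ⟨?_, ?_⟩
  · refine ⟨by ring, by ring, by ring, by ring, by ring, by ring, by ring, by ring⟩
  · ring
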